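-- pv_equiv track=rewrite | github.com/projetmbc/for-writing | @prism/tools/building/cbutils/normval.py | human_range
-- ===== SOURCE A (Python) =====
-- TAG_INDICES = 'indices'
--
-- TAG_RANGE   = 'range'
--
-- def human_range(nbs: list[int]) -> dict[str, str]:
--     if len(nbs) <= 3:
--         return [(TAG_INDICES, nbs)]
--
--     all_batches = []
--     last_batch  = [nbs[0]]
--
--     for i in range(1, len(nbs)):
--         if len(last_batch) == 1:
--             last_batch.append(nbs[i])
--
--             last_delta = nbs[i] - nbs[i-1]
--
--         else:
--             if nbs[i] - nbs[i-1] == last_delta: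
--                 last_batch.append(nbs[i])
--
--             else:
--                 all_batches.append(last_batch)
--
--                 last_batch = [nbs[i]]
--
--     all_batches.append(last_batch)
--
--     data = []
--
--     for batch in all_batches:
--         if len(batch) <= 3:
--             data.append((
--                 TAG_INDICES,
--                 batch
--             ))
--
--         else:
--             data.append((
--                 TAG_RANGE,
--                 [
--                     batch[0],          # Start
--                     batch[-1],         # End
--                     batch[1] - batch[0]  # Step
--                 ]
--             ))
--
--     return data
-- ===== SOURCE B (Python) =====
-- TAG_INDICES = 'indices'
--
-- TAG_RANGE = 'range'
--
-- def _split_run(delta, prev, rest):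
--     # split ``rest`` into the longest prefix continuing the arithmetic run and the remainder
--     for k, x in enumerate(rest):
--         if x - prev != delta:
--             return rest[:k], rest[k:]
--         prev = x
--     return rest, []
--
-- def human_range(nbs):
--     if len(nbs) <= 3:
--         return [(TAG_INDICES, nbs)]
--
--     data = []
--     rest = nbs
--
--     while len(rest) >= 2:
--         a, b = rest[0], rest[1]
--         delta = b - a
--         run, rest = _split_run(delta, b, rest[2:])
--         batch = [a, b] + run
--
--         if len(batch) <= 3:
--             data.append((TAG_INDICES, batch))
--         else:
--             data.append((TAG_RANGE, [a, batch[-1], delta]))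
--
--     if rest:
--         data.append((TAG_INDICES, rest))
--
--     return data
-- ===== Notes on version B (the rewrite author's own statement) =====
-- stated objective: alternative
-- what changed: B replaces A's state-machine fold over indices (all_batches/last_batch/last_delta) plus a second formatting pass with a single run-extraction loop that slices each maximal arithmetic run off the front of the remaining list and emits its formatted batch immediately, with no intermediate batches list.
import Mathlib
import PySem

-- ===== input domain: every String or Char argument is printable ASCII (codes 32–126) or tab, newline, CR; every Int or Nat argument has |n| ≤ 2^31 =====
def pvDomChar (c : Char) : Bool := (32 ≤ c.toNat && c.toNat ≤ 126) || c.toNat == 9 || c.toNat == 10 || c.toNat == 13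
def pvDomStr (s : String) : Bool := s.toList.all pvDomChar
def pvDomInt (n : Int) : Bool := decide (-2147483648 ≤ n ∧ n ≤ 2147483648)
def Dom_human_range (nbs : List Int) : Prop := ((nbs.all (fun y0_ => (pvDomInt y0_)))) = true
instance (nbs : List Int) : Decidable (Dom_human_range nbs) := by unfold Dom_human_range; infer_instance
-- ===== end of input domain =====

-- B replaces A's state-machine fold + second formatting pass by one run-extraction loop
-- (alternative decomposition, same cost); the return values are proved equal on all inputs.

-- ===== PORT A =====
-- A's loop body; every index it reads is in range (the loop only runs when len(nbs) > 3),
-- so the pyGetD defaults never fire.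
def pvStepA (nbs : List Int) (st : List (List Int) × List Int × Int) (i : Int) :
    List (List Int) × List Int × Int :=
  if st.2.1.length = 1 then
    (st.1, st.2.1 ++ [PySem.List.pyGetD nbs i 0],
     PySem.List.pyGetD nbs i 0 - PySem.List.pyGetD nbs (i - 1) 0)
  else if PySem.List.pyGetD nbs i 0 - PySem.List.pyGetD nbs (i - 1) 0 = st.2.2 then
    (st.1, st.2.1 ++ [PySem.List.pyGetD nbs i 0], st.2.2)
  else
    (st.1 ++ [st.2.1], [PySem.List.pyGetD nbs i 0], st.2.2)

-- A's second pass: format one batch (every batch is nonempty, and the range branch is taken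
-- only for length > 3, so the pyGetD defaults never fire).
def pvFormatA (batch : List Int) : String × List Int :=
  if batch.length ≤ 3 then ("indices", batch)
  else ("range", [PySem.List.pyGetD batch 0 0, PySem.List.pyGetD batch (-1) 0,
                  PySem.List.pyGetD batch 1 0 - PySem.List.pyGetD batch 0 0])

def human_range (nbs : List Int) : List (String × List Int) :=
  if nbs.length ≤ 3 then [("indices", nbs)]
  else
    -- last_delta is only read after being set; 0 is a dummy initial value
    let s := (PySem.List.pyRange 1 nbs.length 1).foldl (pvStepA nbs)
               ([], [PySem.List.pyGetD nbs 0 0], 0)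
    (s.1 ++ [s.2.1]).map pvFormatA

-- ===== PORT B =====
-- B's _split_run: longest prefix of the list continuing the arithmetic run, plus remainder.
def takeRun (delta prev : Int) : List Int → List Int × List Int
  | [] => ([], [])
  | x :: xs =>
    if x - prev = delta then
      let p := takeRun delta x xs
      (x :: p.1, p.2)
    else ([], x :: xs)

-- termination measure for B's main loop (the remainder is no longer than the input)
theorem takeRun_len (delta prev : Int) (xs : List Int) :
    (takeRun delta prev xs).2.length ≤ xs.length := by
  induction xs generalizing prev with
  | nil => simp [takeRun]
  | cons x xs ih =>
    simp only [takeRun]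
    split
    · exact Nat.le_succ_of_le (ih x)
    · simp

-- B's emit: format the batch [a, b] + run directly.
def pvFormatB (a b : Int) (run : List Int) : String × List Int :=
  if (a :: b :: run).length ≤ 3 then ("indices", a :: b :: run)
  else ("range", [a, (a :: b :: run).getLast (by simp), b - a])

-- B's main while-loop: slice one maximal run off the front, emit, continue on the rest.
def altGo : List Int → List (String × List Int)
  | [] => []
  | [x] => [("indices", [x])]
  | a :: b :: rest =>
    pvFormatB a b (takeRun (b - a) b rest).1 :: altGo (takeRun (b - a) b rest).2
termination_by l => l.length
decreasing_by
  have := takeRun_len (b - a) b rest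
  simp; omega

def human_range_alt (nbs : List Int) : List (String × List Int) :=
  if nbs.length ≤ 3 then [("indices", nbs)] else altGo nbs

-- ===== PRECONDITION & SPEC =====
def Spec_human_range (nbs : List Int) (out : List (String × List Int)) : Prop := out = human_range_alt nbs
instance (nbs : List Int) (out : List (String × List Int)) : Decidable (Spec_human_range nbs out) := by unfold Spec_human_range; infer_instance

-- ===== CLAIM (what is proved, stated in full; the proofs are below) =====
def Claim_equal_human_range : Prop := ∀ (nbs : List Int), Dom_human_range nbs → Spec_human_range nbs (human_range nbs)

-- ===== LEMMAS AND PROOFS =====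

-- pair-level version of A's step: the step only reads nbs[i-1] and nbs[i]
def stepP (st : List (List Int) × List Int × Int) (pr : Int × Int) :
    List (List Int) × List Int × Int :=
  if st.2.1.length = 1 then (st.1, st.2.1 ++ [pr.2], pr.2 - pr.1)
  else if pr.2 - pr.1 = st.2.2 then (st.1, st.2.1 ++ [pr.2], st.2.2)
  else (st.1 ++ [st.2.1], [pr.2], st.2.2)

-- A's 'all_batches.append(last_batch)' after the loop
def finishOf (s : List (List Int) × List Int × Int) : List (List Int) := s.1 ++ [s.2.1]

-- recursive grouper both sides reduce to
def groupR : List Int → List (List Int)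
  | [] => []
  | [x] => [[x]]
  | a :: b :: rest =>
    (a :: b :: (takeRun (b - a) b rest).1) :: groupR (takeRun (b - a) b rest).2
termination_by l => l.length
decreasing_by
  have := takeRun_len (b - a) b rest
  simp; omega

theorem pyGetD_append_len (pre : List Int) (y : Int) (ys : List Int) (d : Int) :
    PySem.List.pyGetD (pre ++ y :: ys) (pre.length : Int) d = y := by
  rw [PySem.List.pyGetD_natCast]
  simp [List.getD]

theorem stepA_eq (pre : List Int) (p x : Int) (l : List Int) (st) :
    pvStepA (pre ++ p :: x :: l) st ((pre.length : Int) + 1) = stepP st (p, x) := by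
  have h1 : PySem.List.pyGetD (pre ++ p :: x :: l) ((pre.length : Int) + 1) 0 = x := by
    have := pyGetD_append_len (pre ++ [p]) x l 0
    simpa using this
  have h2 : PySem.List.pyGetD (pre ++ p :: x :: l) ((pre.length : Int) + 1 - 1) 0 = p := by
    have := pyGetD_append_len pre p (x :: l) 0
    simpa using this
  simp only [pvStepA, stepP, h1, h2]

theorem bridge (l : List Int) : ∀ (pre : List Int) (p : Int) (st),
    (PySem.List.pyRange ((pre.length : Int) + 1) ((pre.length : Int) + 1 + l.length) 1).foldl
        (pvStepA (pre ++ p :: l)) st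
    = ((p :: l).zip l).foldl stepP st := by
  induction l with
  | nil => intro pre p st; simp [PySem.List.pyRange_one_eq_nil]
  | cons x xs ih =>
    intro pre p st
    have hlt : ((pre.length : Int) + 1) < ((pre.length : Int) + 1 + ((x :: xs).length : Int)) := by
      simp only [List.length_cons]; push_cast; omega
    rw [PySem.List.pyRange_one_cons hlt, List.foldl_cons, stepA_eq,
        List.zip_cons_cons, List.foldl_cons]
    have h := ih (pre ++ [p]) x (stepP st (p, x))
    simp only [List.length_append, List.length_cons, List.length_nil, List.append_assoc,
      List.cons_append, List.nil_append] at h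
    push_cast at h
    simp only [List.length_cons]
    push_cast
    rw [show ((pre.length : Int) + 1 + ((xs.length : Int) + 1)) = (pre.length : Int) + 1 + 1 + (xs.length : Int) from by ring]
    convert h using 3

-- A's grouping loop computes groupR: proved for the two loop phases simultaneously
-- (last_batch still a singleton, or already paired with its delta).
theorem finish_fold (n : Nat) :
    (∀ xs : List Int, xs.length ≤ n → ∀ (p d : Int) (allB : List (List Int)) (lastB : List Int),
      2 ≤ lastB.length →
      finishOf (((p :: xs).zip xs).foldl stepP (allB, lastB, d))
      = allB ++ (lastB ++ (takeRun d p xs).1) :: groupR (takeRun d p xs).2) ∧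
    (∀ xs : List Int, xs.length ≤ n → ∀ (x d : Int) (allB : List (List Int)),
      finishOf (((x :: xs).zip xs).foldl stepP (allB, [x], d))
      = allB ++ groupR (x :: xs)) := by
  induction n with
  | zero =>
    constructor
    · intro xs hxs p d allB lastB _
      have hx : xs = [] := List.eq_nil_of_length_eq_zero (Nat.le_zero.mp hxs)
      subst hx; simp [takeRun, groupR, finishOf]
    · intro xs hxs x d allB
      have hx : xs = [] := List.eq_nil_of_length_eq_zero (Nat.le_zero.mp hxs)
      subst hx; simp [groupR, finishOf]
  | succ n ih =>
    obtain ⟨ih2, ih1⟩ := ih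
    constructor
    · intro xs hxs p d allB lastB hlen
      cases xs with
      | nil => simp [takeRun, groupR, finishOf]
      | cons z zs =>
        have hzs : zs.length ≤ n := by simp at hxs; omega
        have hne : ¬ lastB.length = 1 := by omega
        simp only [List.zip_cons_cons, List.foldl_cons]
        by_cases hz : z - p = d
        · have e1 : stepP (allB, lastB, d) (p, z) = (allB, lastB ++ [z], d) := by
            simp [stepP, hne, hz]
          rw [e1, ih2 zs hzs z d allB (lastB ++ [z]) (by simp; omega)]
          simp [takeRun, hz]
        · have e1 : stepP (allB, lastB, d) (p, z) = (allB ++ [lastB], [z], d) := by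
            simp [stepP, hne, hz]
          rw [e1, ih1 zs hzs z d (allB ++ [lastB])]
          simp [takeRun, hz]
    · intro xs hxs x d allB
      cases xs with
      | nil => simp [groupR, finishOf]
      | cons y ys =>
        have hys : ys.length ≤ n := by simp at hxs; omega
        simp only [List.zip_cons_cons, List.foldl_cons]
        have e1 : stepP (allB, [x], d) (x, y) = (allB, [x, y], y - x) := by
          simp [stepP]
        rw [e1, ih2 ys hys y (y - x) allB [x, y] (by simp)]
        rw [groupR]
        simp

theorem formatB_eq (a b : Int) (run : List Int) :
    pvFormatB a b run = pvFormatA (a :: b :: run) := by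
  unfold pvFormatB pvFormatA
  by_cases h : (a :: b :: run).length ≤ 3
  · rw [if_pos h, if_pos h]
  · have h0 : PySem.List.pyGetD (a :: b :: run) (0 : Int) 0 = a := by
      simpa using pyGetD_append_len [] a (b :: run) 0
    have h1 : PySem.List.pyGetD (a :: b :: run) (1 : Int) 0 = b := by
      simpa using pyGetD_append_len [a] b run 0
    have hm1 : PySem.List.pyGetD (a :: b :: run) (-1 : Int) 0
        = (a :: b :: run).getLast (by simp) := PySem.List.pyGetD_neg_one _ _ _
    rw [if_neg h, if_neg h]
    simp [h0, h1, hm1]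

theorem altGo_eq (l : List Int) : altGo l = (groupR l).map pvFormatA := by
  induction l using altGo.induct with
  | case1 => simp [altGo, groupR]
  | case2 x => simp [altGo, groupR, pvFormatA]
  | case3 a b rest ih =>
    rw [altGo, groupR]
    simp only [List.map_cons]
    rw [ih, formatB_eq]

-- ===== VERDICT (by name: the statement is the Claim_ definition above) =====
theorem human_range_spec : Claim_equal_human_range := by
  intro nbs _
  unfold Spec_human_range human_range human_range_alt
  by_cases h : nbs.length ≤ 3
  · simp [h]
  · rw [if_neg h, if_neg h]
    cases nbs with
    | nil => simp at h
    | cons p l =>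
      rw [altGo_eq]
      have hb := bridge l [] p ([], [PySem.List.pyGetD (p :: l) 0 0], 0)
      simp only [List.length_nil, List.nil_append] at hb
      push_cast at hb
      have hf := (finish_fold l.length).2 l le_rfl p 0 []
      have h0 : PySem.List.pyGetD (p :: l) (0 : Int) 0 = p := by
        simpa using pyGetD_append_len [] p l 0
      simp only [h0] at hb ⊢
      simp only [List.length_cons]
      push_cast
      rw [show ((l.length : Int) + 1) = 1 + (l.length : Int) from by ring]
      rw [hb]
      unfold finishOf at hf
      rw [hf]
      simp
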